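-- pv_equiv track=rewrite | github.com/blakejac/qtCat | BlakeFunctions.py | dyckDinv
-- ===== SOURCE A (Python) =====
-- def dyckDinv(d):
--     '''
--     This code will calculate the dinv statistic of an area Dyck vector.
--     '''
--     dinv = 0
--     d = list(d)
--     for i in range(len(d)):
--         for j in range(i+1,len(d),1):
--             if d[i] - d[j] == 0 or d[i] - d[j] == 1:
--                 dinv += 1
--     return dinv
-- ===== SOURCE B (Python) =====
-- def dyckDinv(d):
--     '''
--     Dinv of an area Dyck vector: count pairs i<j with d[i]-d[j] in {0,1}.
--     Single left-to-right pass with a dict of value counts seen so far.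
--     '''
--     seen = {}
--     dinv = 0
--     for x in d:
--         dinv += seen.get(x, 0) + seen.get(x + 1, 0)
--         seen[x] = seen.get(x, 0) + 1
--     return dinv
-- ===== Notes on version B (the rewrite author's own statement) =====
-- stated objective: faster
-- what changed: Replaced the quadratic all-pairs double loop by a single left-to-right pass keeping a dict of counts of values seen so far, adding the counts of equal and value+1 predecessors at each element.
import Mathlib
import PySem

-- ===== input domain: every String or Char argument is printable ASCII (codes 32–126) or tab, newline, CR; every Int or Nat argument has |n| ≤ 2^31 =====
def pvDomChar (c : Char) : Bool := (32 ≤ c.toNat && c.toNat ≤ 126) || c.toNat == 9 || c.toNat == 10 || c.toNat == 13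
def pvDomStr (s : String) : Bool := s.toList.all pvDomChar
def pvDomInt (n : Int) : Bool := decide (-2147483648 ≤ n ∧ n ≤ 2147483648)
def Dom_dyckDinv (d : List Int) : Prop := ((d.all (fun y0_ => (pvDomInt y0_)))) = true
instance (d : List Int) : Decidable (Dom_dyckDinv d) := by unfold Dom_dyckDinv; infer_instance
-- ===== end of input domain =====

-- B replaces A's quadratic all-pairs double loop by one left-to-right pass with a dict
-- counting values seen so far (faster: asymptotic, O(n) vs O(n^2)).


-- ===== PORT A =====
-- indices i, j produced by the ranges are always in bounds, so pyGetD's default 0 is never used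
def dyckDinv (d : List Int) : Int :=
  (PySem.List.pyRange 0 (d.length : Int) 1).foldl (fun dinv i =>
    (PySem.List.pyRange (i + 1) (d.length : Int) 1).foldl (fun dinv j =>
      if PySem.List.pyGetD d i 0 - PySem.List.pyGetD d j 0 = 0 ∨
         PySem.List.pyGetD d i 0 - PySem.List.pyGetD d j 0 = 1 then dinv + 1 else dinv)
      dinv) 0

-- ===== PORT B =====
def dyckDinv_alt (d : List Int) : Int :=
  (d.foldl
    (fun (st : PySem.Dict Int Int × Int) x =>
      (st.1.insert x (st.1.getD x 0 + 1),
       st.2 + st.1.getD x 0 + st.1.getD (x + 1) 0))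
    (PySem.Dict.empty, 0)).2

-- ===== PRECONDITION & SPEC =====
def Spec_dyckDinv (d : List Int) (out : Int) : Prop := out = dyckDinv_alt d
instance (d : List Int) (out : Int) : Decidable (Spec_dyckDinv d out) := by unfold Spec_dyckDinv; infer_instance

-- ===== CLAIM (what is proved, stated in full; the proofs are below) =====
def Claim_equal_dyckDinv : Prop := ∀ (d : List Int), Dom_dyckDinv d → Spec_dyckDinv d (dyckDinv d)

-- ===== LEMMAS AND PROOFS =====

-- number of y in ys with x - y ∈ {0, 1}
def cntPairs (x : Int) (ys : List Int) : Int :=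
  (ys.countP (fun y => decide (x - y = 0 ∨ x - y = 1)) : Int)

-- pair count, structurally: each head against its tail
def gPairs : List Int → Int
  | [] => 0
  | x :: xs => cntPairs x xs + gPairs xs

lemma dyckDinv_eq_sum (d : List Int) :
    dyckDinv d =
      ((List.range d.length).map
        (fun k => cntPairs (d.getD k 0) (d.drop (k + 1)))).sum := by
  unfold dyckDinv
  rw [PySem.List.foldl_congr_mem' _ _
    (fun dinv i => dinv + cntPairs (PySem.List.pyGetD d i 0) (d.drop (i + 1).toNat)) 0 ?_]
  · rw [PySem.List.foldl_add, PySem.List.pyRange_zero_nat, List.map_map, zero_add]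
    apply congrArg
    apply List.map_congr_left
    intro k hk
    have h1 : ((k : Int) + 1).toNat = k + 1 := by omega
    simp [PySem.List.pyGetD_natCast, h1]
  · intro i hi acc
    have h0 : (0 : Int) ≤ i + 1 := by
      have := (PySem.List.mem_pyRange_one.mp hi).1; omega
    rw [PySem.List.foldl_pyRange_pyGetD' d 0
      (fun acc y => if PySem.List.pyGetD d i 0 - y = 0 ∨ PySem.List.pyGetD d i 0 - y = 1
        then acc + 1 else acc) acc h0]
    rw [PySem.List.foldl_ite_add_one]
    rfl

lemma sum_range_eq_gPairs (d : List Int) :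
    ((List.range d.length).map
      (fun k => cntPairs (d.getD k 0) (d.drop (k + 1)))).sum = gPairs d := by
  induction d with
  | nil => rfl
  | cons x xs ih =>
    rw [List.length_cons, List.range_succ_eq_map, List.map_cons, List.map_map]
    simp only [List.sum_cons, Function.comp_def]
    have h2 : ((List.range xs.length).map
        (fun k => cntPairs ((x :: xs).getD (k + 1) 0) ((x :: xs).drop (k + 1 + 1)))).sum
        = ((List.range xs.length).map
        (fun k => cntPairs (xs.getD k 0) (xs.drop (k + 1)))).sum := by
      apply congrArg
      apply List.map_congr_left
      intro k hk
      simp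
    rw [h2, ih]
    simp [gPairs]

lemma cnt_split (x : Int) (xs : List Int) :
    (xs.map (fun y => ((if y = x then (1 : Int) else 0) + (if y + 1 = x then (1 : Int) else 0)))).sum
      = cntPairs x xs := by
  induction xs with
  | nil => simp [cntPairs]
  | cons y ys ih =>
    simp only [List.map_cons, List.sum_cons, cntPairs, List.countP_cons] at *
    rw [ih]
    push_cast
    split_ifs <;> simp_all <;> omega

lemma bloop (xs : List Int) : ∀ (c : PySem.Dict Int Int) (acc : Int),
    (xs.foldl
      (fun (st : PySem.Dict Int Int × Int) x =>
        (st.1.insert x (st.1.getD x 0 + 1),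
         st.2 + st.1.getD x 0 + st.1.getD (x + 1) 0))
      (c, acc)).2
    = acc + gPairs xs + (xs.map (fun y => c.getD y 0 + c.getD (y + 1) 0)).sum := by
  induction xs with
  | nil => intro c acc; simp [show gPairs [] = 0 from rfl]
  | cons x xs ih =>
    intro c acc
    rw [List.foldl_cons, ih]
    have hfun : ∀ y : Int,
        (c.insert x (c.getD x 0 + 1)).getD y 0 + (c.insert x (c.getD x 0 + 1)).getD (y + 1) 0
        = (c.getD y 0 + c.getD (y + 1) 0) +
          ((if y = x then (1 : Int) else 0) + (if y + 1 = x then (1 : Int) else 0)) := by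
      intro y
      rw [PySem.Dict.getD_insert, PySem.Dict.getD_insert]
      by_cases h1 : y = x <;> by_cases h2 : y + 1 = x <;> simp [h1, h2] <;> omega
    have hpt : (xs.map (fun y =>
        (c.insert x (c.getD x 0 + 1)).getD y 0 +
        (c.insert x (c.getD x 0 + 1)).getD (y + 1) 0)).sum
      = (xs.map (fun y => c.getD y 0 + c.getD (y + 1) 0)).sum + cntPairs x xs := by
      have : (xs.map (fun y =>
          (c.insert x (c.getD x 0 + 1)).getD y 0 +
          (c.insert x (c.getD x 0 + 1)).getD (y + 1) 0))
          = xs.map (fun y => (c.getD y 0 + c.getD (y + 1) 0) +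
            ((if y = x then (1 : Int) else 0) + (if y + 1 = x then (1 : Int) else 0))) := by
        exact List.map_congr_left (fun y _ => hfun y)
      rw [this, PySem.List.sum_map_add_int, cnt_split]
    rw [hpt]
    simp only [gPairs, List.map_cons, List.sum_cons]
    ring

theorem dyckDinv_eq_gPairs (d : List Int) : dyckDinv d = gPairs d := by
  rw [dyckDinv_eq_sum, sum_range_eq_gPairs]

theorem dyckDinv_alt_eq_gPairs (d : List Int) : dyckDinv_alt d = gPairs d := by
  unfold dyckDinv_alt
  rw [bloop]
  simp [PySem.Dict.getD_empty]

-- ===== VERDICT (by name: the statement is the Claim_ definition above) =====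
theorem dyckDinv_spec : Claim_equal_dyckDinv := by
  intro d _
  unfold Spec_dyckDinv
  rw [dyckDinv_eq_gPairs, dyckDinv_alt_eq_gPairs]
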